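-- pv_equiv track=rewrite | github.com/ovsrobot/dpdk | devtools/analyze-patch.py | split_mbox_patches
-- ===== SOURCE A (Python) =====
-- def split_mbox_patches(content):
--     """Split an mbox file into individual patches."""
--     patches = []
--     current_patch = []
--     in_patch = False
--
--     for line in content.split("\n"):
--         # Detect start of new message in mbox format
--         if line.startswith("From ") and (
--             " Mon " in line
--             or " Tue " in line
--             or " Wed " in line
--             or " Thu " in line
--             or " Fri " in line
--             or " Sat " in line
--             or " Sun " in line
--         ):
--             if current_patch:
--                 patches.append("\n".join(current_patch))
--             current_patch = [line]
--             in_patch = True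
--         elif in_patch:
--             current_patch.append(line)
--
--     # Don't forget the last patch
--     if current_patch:
--         patches.append("\n".join(current_patch))
--
--     return patches if patches else [content]
-- ===== SOURCE B (Python) =====
-- _DAYS = (" Mon ", " Tue ", " Wed ", " Thu ", " Fri ", " Sat ", " Sun ")
--
--
-- def _is_header(line):
--     return line.startswith("From ") and any(day in line for day in _DAYS)
--
--
-- def split_mbox_patches(content):
--     """Split an mbox file into individual patches."""
--     lines = content.split("\n")
--     starts = [i for i, line in enumerate(lines) if _is_header(line)]
--     if not starts:
--         return [content]
--     bounds = starts + [len(lines)]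
--     return ["\n".join(lines[a:b]) for a, b in zip(bounds, bounds[1:])]
-- ===== Notes on version B (the rewrite author's own statement) =====
-- stated objective: simpler
-- what changed: Replaces the stateful accumulator loop (current_patch/in_patch flags with a trailing flush) by collecting the header-line indices in one scan and slicing the line list between consecutive headers.
import Mathlib
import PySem

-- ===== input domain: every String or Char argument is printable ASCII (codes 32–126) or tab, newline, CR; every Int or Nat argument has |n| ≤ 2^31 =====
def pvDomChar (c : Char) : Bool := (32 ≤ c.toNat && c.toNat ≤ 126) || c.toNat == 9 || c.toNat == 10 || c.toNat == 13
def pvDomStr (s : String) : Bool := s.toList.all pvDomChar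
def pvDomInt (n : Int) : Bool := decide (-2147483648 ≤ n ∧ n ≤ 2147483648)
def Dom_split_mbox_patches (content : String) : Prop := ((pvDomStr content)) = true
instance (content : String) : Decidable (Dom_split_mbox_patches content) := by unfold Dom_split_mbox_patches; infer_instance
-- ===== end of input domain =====

-- B replaces A's stateful accumulator loop (current_patch/in_patch with a final flush) by one scan
-- collecting header-line indices and slicing between consecutive headers (objective: simpler).

-- ===== PORT A =====
-- A's inline mbox-header test: line.startswith("From ") and one of the seven " Day " substrings occurs
def pvIsHeaderA (line : String) : Bool :=
  PySem.Str.startswith line "From " &&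
    (PySem.Str.isIn " Mon " line || PySem.Str.isIn " Tue " line || PySem.Str.isIn " Wed " line ||
     PySem.Str.isIn " Thu " line || PySem.Str.isIn " Fri " line || PySem.Str.isIn " Sat " line ||
     PySem.Str.isIn " Sun " line)

def split_mbox_patches (content : String) : List String :=
  -- content.split("\n") with a non-empty literal separator never raises: split? is always `some`
  let r := ((PySem.Str.split? content "\n").getD []).foldl
    (fun (st : List String × List String × Bool) line =>
      if pvIsHeaderA line then
        ((if st.2.1 ≠ [] then st.1 ++ [PySem.Str.join "\n" st.2.1] else st.1), [line], true)
      else if st.2.2 then (st.1, st.2.1 ++ [line], st.2.2)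
      else st)
    ([], [], false)
  let patches := if r.2.1 ≠ [] then r.1 ++ [PySem.Str.join "\n" r.2.1] else r.1
  if patches = [] then [content] else patches

-- ===== PORT B =====
def pvIsHeaderB (line : String) : Bool :=
  PySem.Str.startswith line "From " &&
    (PySem.Str.isIn " Mon " line || PySem.Str.isIn " Tue " line || PySem.Str.isIn " Wed " line ||
     PySem.Str.isIn " Thu " line || PySem.Str.isIn " Fri " line || PySem.Str.isIn " Sat " line ||
     PySem.Str.isIn " Sun " line)

def split_mbox_patches_alt (content : String) : List String :=
  let lines := (PySem.Str.split? content "\n").getD []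
  let starts := ((PySem.List.enumerate lines 0).filter (fun p => pvIsHeaderB p.2)).map (·.1)
  if starts = [] then [content]
  else
    let bounds := starts ++ [(lines.length : Int)]
    (bounds.zip (PySem.List.slice bounds (some 1) none)).map
      (fun p => PySem.Str.join "\n" (PySem.List.slice lines (some p.1) (some p.2)))

-- ===== PRECONDITION & SPEC =====
def Spec_split_mbox_patches (content : String) (out : List String) : Prop := out = split_mbox_patches_alt content
instance (content : String) (out : List String) : Decidable (Spec_split_mbox_patches content out) := by unfold Spec_split_mbox_patches; infer_instance

-- ===== CLAIM (what is proved, stated in full; the proofs are below) =====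
def Claim_equal_split_mbox_patches : Prop := ∀ (content : String), Dom_split_mbox_patches content → Spec_split_mbox_patches content (split_mbox_patches content)

-- ===== LEMMAS AND PROOFS =====

def pvStepA (isH : String → Bool) (st : List String × List String × Bool) (line : String) :
    List String × List String × Bool :=
  if isH line then
    ((if st.2.1 ≠ [] then st.1 ++ [PySem.Str.join "\n" st.2.1] else st.1), [line], true)
  else if st.2.2 then (st.1, st.2.1 ++ [line], st.2.2)
  else st
def pvPostA (r : List String × List String × Bool) : List String :=
  if r.2.1 ≠ [] then r.1 ++ [PySem.Str.join "\n" r.2.1] else r.1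
def pvSegsAux (isH : String → Bool) (cur : List String) : List String → List (List String)
  | [] => [cur]
  | l :: ls => if isH l then cur :: pvSegsAux isH [l] ls else pvSegsAux isH (cur ++ [l]) ls
def pvDropSeg (isH : String → Bool) : List String → List (List String)
  | [] => []
  | l :: ls => if isH l then pvSegsAux isH [l] ls else pvDropSeg isH ls
def pvHIdx (isH : String → Bool) : List String → List Nat
  | [] => []
  | l :: ls => if isH l then 0 :: (pvHIdx isH ls).map (· + 1) else (pvHIdx isH ls).map (· + 1)

theorem pv_fold_true (isH : String → Bool) (ls : List String) :
    ∀ (patches cur : List String), cur ≠ [] →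
      pvPostA (ls.foldl (pvStepA isH) (patches, cur, true)) =
        patches ++ (pvSegsAux isH cur ls).map (PySem.Str.join "\n") := by
  induction ls with
  | nil => intro patches cur h; simp [pvPostA, pvSegsAux, h]
  | cons l ls ih =>
    intro patches cur h
    by_cases hH : isH l
    · simp only [List.foldl_cons, pvStepA, hH, if_pos, h, ne_eq, not_false_iff]
      rw [ih _ [l] (by simp)]
      simp [pvSegsAux, hH, List.append_assoc]
    · simp only [List.foldl_cons, pvStepA, hH, Bool.false_eq_true, if_false, if_true]
      rw [ih _ (cur ++ [l]) (by simp)]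
      simp [pvSegsAux, hH]

theorem pv_fold_false (isH : String → Bool) (ls : List String) :
    ∀ (patches : List String),
      pvPostA (ls.foldl (pvStepA isH) (patches, [], false)) =
        patches ++ (pvDropSeg isH ls).map (PySem.Str.join "\n") := by
  induction ls with
  | nil => intro patches; simp [pvPostA, pvDropSeg]
  | cons l ls ih =>
    intro patches
    by_cases hH : isH l
    · simp only [List.foldl_cons, pvStepA, hH, if_true, ne_eq, not_true_eq_false]
      rw [pv_fold_true isH ls _ [l] (by simp)]
      simp [pvDropSeg, hH]
    · simp only [List.foldl_cons, pvStepA, hH, Bool.false_eq_true, if_false]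
      rw [ih patches]
      simp [pvDropSeg, hH]

theorem pv_segsAux_eq (isH : String → Bool) (ls : List String) :
    ∀ cur, pvSegsAux isH cur ls =
      (cur ++ ls.takeWhile (fun l => !isH l)) :: pvDropSeg isH (ls.dropWhile (fun l => !isH l)) := by
  induction ls with
  | nil => intro cur; simp [pvSegsAux, pvDropSeg]
  | cons l ls ih =>
    intro cur
    by_cases hH : isH l
    · simp [pvSegsAux, pvDropSeg, hH]
    · simp only [pvSegsAux, hH, Bool.false_eq_true, if_false, ih (cur ++ [l]),
        List.takeWhile_cons, List.dropWhile_cons]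
      simp

theorem pv_dropSeg_dropWhile (isH : String → Bool) (ls : List String) :
    pvDropSeg isH (ls.dropWhile (fun l => !isH l)) = pvDropSeg isH ls := by
  induction ls with
  | nil => simp
  | cons l ls ih =>
    by_cases hH : isH l
    · simp [hH]
    · simp [hH, ih, pvDropSeg]

theorem pv_hIdx_headD_take (isH : String → Bool) (ls : List String) :
    ls.take ((pvHIdx isH ls).headD ls.length) = ls.takeWhile (fun l => !isH l) := by
  induction ls with
  | nil => simp [pvHIdx]
  | cons l ls ih =>
    by_cases hH : isH l
    · simp [pvHIdx, hH]
    · have hhead : ((pvHIdx isH ls).map (· + 1)).headD (ls.length + 1)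
          = (pvHIdx isH ls).headD ls.length + 1 := by
        cases pvHIdx isH ls <;> simp
      simp only [pvHIdx, hH, Bool.false_eq_true, if_false, List.length_cons, hhead,
        List.take_succ_cons, List.takeWhile_cons, Bool.not_false, ih]
      simp

theorem pv_shift (l : String) (ls : List String) (ks : List Nat) :
    ((ks.map (· + 1)).zip ((ks.map (· + 1)).tail)).map
        (fun p => ((l :: ls).drop p.1).take (p.2 - p.1)) =
      (ks.zip ks.tail).map (fun p => (ls.drop p.1).take (p.2 - p.1)) := by
  rw [← List.map_tail, List.zip_map, List.map_map]
  refine List.map_congr_left ?_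
  intro p _
  simp [Nat.add_sub_add_right]

theorem pv_enum_filter (isH : String → Bool) (ls : List String) :
    ∀ s : Int, ((PySem.List.enumerate ls s).filter (fun p => isH p.2)).map (·.1) =
      (pvHIdx isH ls).map (fun (k : Nat) => s + (k : Int)) := by
  induction ls with
  | nil => intro s; simp [PySem.List.enumerate_nil, pvHIdx]
  | cons l ls ih =>
    intro s
    rw [PySem.List.enumerate_cons]
    by_cases hH : isH l
    · rw [List.filter_cons_of_pos (by simpa using hH), List.map_cons, ih (s + 1)]
      simp only [pvHIdx, hH, if_true, List.map_cons, List.map_map, List.cons.injEq]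
      refine ⟨by simp, List.map_congr_left ?_⟩
      intro k _
      simp only [Function.comp_apply]
      push_cast; ring
    · rw [List.filter_cons_of_neg (by simpa using hH), ih (s + 1)]
      simp only [pvHIdx, hH, Bool.false_eq_true, if_false, List.map_map]
      refine List.map_congr_left ?_
      intro k _
      simp only [Function.comp_apply]
      push_cast; ring

theorem pv_main (isH : String → Bool) (ls : List String) :
    (((pvHIdx isH ls ++ [ls.length]).zip ((pvHIdx isH ls ++ [ls.length]).tail)).map
        (fun p => (ls.drop p.1).take (p.2 - p.1))) = pvDropSeg isH ls := by
  induction ls with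
  | nil => simp [pvHIdx, pvDropSeg]
  | cons l ls ih =>
    by_cases hH : isH l
    · have ht := pv_hIdx_headD_take isH ls
      cases hks : pvHIdx isH ls with
      | nil =>
        rw [hks] at ht
        rw [List.headD_nil, List.take_of_length_le (le_refl _)] at ht
        have hdw : ls.dropWhile (fun l => !isH l) = [] := by
          have hlen := congrArg List.length (List.takeWhile_append_dropWhile (p := fun l => !isH l) (l := ls))
          rw [List.length_append, ← ht] at hlen
          exact List.eq_nil_of_length_eq_zero (by omega)
        simp only [pvHIdx, hH, if_true, hks, List.map_nil, List.length_cons, List.nil_append,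
          List.cons_append, List.zip_cons_cons, List.tail_cons, List.zip_nil_right,
          List.map_cons, List.map_nil, List.drop_zero, Nat.sub_zero]
        rw [List.take_of_length_le (by simp)]
        simp only [pvDropSeg, hH, if_true, pv_segsAux_eq isH ls [l], hdw, ← ht]
        simp
      | cons k0 is' =>
        rw [hks] at ht
        simp only [List.headD_cons] at ht
        have hstep : pvHIdx isH (l :: ls) ++ [(l :: ls).length]
            = 0 :: ((k0 :: (is' ++ [ls.length])).map (· + 1)) := by
          simp [pvHIdx, hH, hks, List.map_append]
        rw [hstep]
        have htail : (0 : Nat) :: ((k0 :: (is' ++ [ls.length])).map (· + 1)) ≠ [] := by simp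
        -- zip (0 :: ms) ms with ms nonempty
        simp only [List.map_cons, List.zip_cons_cons, List.tail_cons, List.map_cons]
        -- first pair
        have h1 : (((l :: ls).drop 0).take (k0 + 1 - 0)) = l :: ls.takeWhile (fun l => !isH l) := by
          simp [ht]
        -- remaining pairs: reassemble into the pv_shift shape
        have h2 : ((((k0 + 1) :: (is' ++ [ls.length]).map (· + 1)).zip
              ((is' ++ [ls.length]).map (· + 1))).map
              (fun p => ((l :: ls).drop p.1).take (p.2 - p.1)))
            = pvDropSeg isH ls := by
          have : ((k0 + 1) :: (is' ++ [ls.length]).map (· + 1))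
              = ((k0 :: (is' ++ [ls.length])).map (· + 1)) := by simp
          rw [this]
          have : ((is' ++ [ls.length]).map (· + 1))
              = ((k0 :: (is' ++ [ls.length])).map (· + 1)).tail := by simp
          rw [this, pv_shift l ls]
          have : (k0 :: (is' ++ [ls.length])) = pvHIdx isH ls ++ [ls.length] := by simp [hks]
          rw [this]
          exact ih
        rw [h1, h2]
        simp only [pvDropSeg, hH, if_true, pv_segsAux_eq isH ls [l], pv_dropSeg_dropWhile]
        simp
    · have hstep : pvHIdx isH (l :: ls) ++ [(l :: ls).length]
          = (pvHIdx isH ls ++ [ls.length]).map (· + 1) := by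
        simp [pvHIdx, hH, List.map_append]
      rw [hstep, pv_shift l ls, ih]
      simp [pvDropSeg, hH]

theorem pv_master (isH : String → Bool) (content : String) (lines : List String) :
    (let r := lines.foldl (pvStepA isH) ([], [], false)
     let patches := pvPostA r
     if patches = [] then [content] else patches) =
    (let starts := ((PySem.List.enumerate lines 0).filter (fun p => isH p.2)).map (·.1)
     if starts = [] then [content]
     else
       let bounds := starts ++ [(lines.length : Int)]
       (bounds.zip (PySem.List.slice bounds (some 1) none)).map
         (fun p => PySem.Str.join "\n" (PySem.List.slice lines (some p.1) (some p.2)))) := by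
  simp only [pv_fold_false isH lines [], List.nil_append]
  have hstarts : ((PySem.List.enumerate lines 0).filter (fun p => isH p.2)).map (·.1)
      = (pvHIdx isH lines).map (fun (k : Nat) => (k : Int)) := by
    rw [pv_enum_filter isH lines 0]
    exact List.map_congr_left (by intro k _; simp)
  rw [hstarts]
  cases hs : pvHIdx isH lines with
  | nil =>
    have hd : pvDropSeg isH lines = [] := by
      rw [← pv_main isH lines, hs]
      simp
    simp [hd]
  | cons k0 is' =>
    have hne : pvDropSeg isH lines ≠ [] := by
      rw [← pv_main isH lines, hs]
      simp [List.zip_eq_nil_iff]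
    have hbounds : ((k0 :: is').map (fun (k : Nat) => (k : Int))) ++ [(lines.length : Int)]
        = ((k0 :: is') ++ [lines.length]).map (fun (k : Nat) => (k : Int)) := by
      simp
    simp only [List.map_cons, not_false_iff, if_neg, List.cons_ne_nil,
      List.map_eq_nil_iff]
    rw [← List.map_cons, hbounds, PySem.List.slice_from_one, ← List.map_tail, List.zip_map]
    rw [List.map_map]
    have hcong : ((k0 :: is' ++ [lines.length]).zip ((k0 :: is' ++ [lines.length]).tail)).map
          ((fun p => PySem.Str.join "\n" (PySem.List.slice lines (some p.1) (some p.2))) ∘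
            Prod.map (fun (k : Nat) => (k : Int)) (fun (k : Nat) => (k : Int)))
        = ((k0 :: is' ++ [lines.length]).zip ((k0 :: is' ++ [lines.length]).tail)).map
          (fun p => PySem.Str.join "\n" ((lines.drop p.1).take (p.2 - p.1))) := by
      refine List.map_congr_left ?_
      intro p _
      simp [PySem.List.slice_natCast]
    rw [hcong, if_neg hne]
    rw [show (fun p : Nat × Nat => PySem.Str.join "\n" (List.take (p.2 - p.1) (List.drop p.1 lines)))
        = (PySem.Str.join "\n") ∘ (fun p : Nat × Nat => List.take (p.2 - p.1) (List.drop p.1 lines))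
        from rfl, ← List.map_map]
    rw [show k0 :: is' ++ [lines.length] = pvHIdx isH lines ++ [lines.length] from by rw [hs]]
    rw [pv_main isH lines]

-- ===== VERDICT (by name: the statement is the Claim_ definition above) =====
theorem split_mbox_patches_spec : Claim_equal_split_mbox_patches := by
  intro content _
  unfold Spec_split_mbox_patches split_mbox_patches split_mbox_patches_alt
  exact pv_master pvIsHeaderA content ((PySem.Str.split? content "\n").getD [])
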